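-- pv_equiv track=rewrite | github.com/Anastasia7Si/python_workout | training_func.py | even_odd_sums
-- ===== SOURCE A (Python) =====
-- def even_odd_sums(number_sequence):
--     even_sum = sum(
--         number_sequence[i] for i in range(len(number_sequence)) if i % 2 == 0
--         )
--     odd_sum = sum(
--         number_sequence[i] for i in range(len(number_sequence)) if i % 2 != 0
--         )
--     return [even_sum, odd_sum]
-- ===== SOURCE B (Python) =====
-- def even_odd_sums(number_sequence):
--     res = [0, 0]
--     for i in range(len(number_sequence)):
--         res[i % 2] += number_sequence[i]
--     return res
-- ===== Notes on version B (the rewrite author's own statement) =====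
-- stated objective: alternative
-- what changed: Replaces A's two filtered generator passes (one per parity) with a single index loop that accumulates into res[i % 2].
import Mathlib
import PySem

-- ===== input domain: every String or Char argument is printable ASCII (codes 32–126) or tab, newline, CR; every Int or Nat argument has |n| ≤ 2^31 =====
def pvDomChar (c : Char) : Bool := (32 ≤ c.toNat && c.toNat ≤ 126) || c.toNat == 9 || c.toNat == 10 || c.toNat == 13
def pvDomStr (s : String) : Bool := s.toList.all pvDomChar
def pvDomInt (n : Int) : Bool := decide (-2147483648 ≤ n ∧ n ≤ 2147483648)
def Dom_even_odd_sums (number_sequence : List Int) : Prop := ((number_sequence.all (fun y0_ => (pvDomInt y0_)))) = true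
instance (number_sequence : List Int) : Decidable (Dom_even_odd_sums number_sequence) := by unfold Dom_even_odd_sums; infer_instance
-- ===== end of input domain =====

-- B replaces A's two filtered passes with a single index loop accumulating into res[i % 2] (alternative decomposition, same cost).

-- ===== PORT A =====
-- two generator-sum passes over range(len(xs)), filtered by parity
def even_odd_sums (number_sequence : List Int) : List Int :=
  let even_sum := (List.range number_sequence.length).foldl
    (fun s i => if i % 2 == 0 then s + number_sequence.getD i 0 else s) 0
  let odd_sum := (List.range number_sequence.length).foldl
    (fun s i => if i % 2 != 0 then s + number_sequence.getD i 0 else s) 0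
  [even_sum, odd_sum]

-- ===== PORT B =====
-- one index loop over range(len(xs)); res = [0,0]; res[i % 2] += xs[i]
def even_odd_sums_alt (number_sequence : List Int) : List Int :=
  let res := (List.range number_sequence.length).foldl
    (fun (r : Int × Int) i =>
      if i % 2 == 0 then (r.1 + number_sequence.getD i 0, r.2)
      else (r.1, r.2 + number_sequence.getD i 0)) (0, 0)
  [res.1, res.2]

-- ===== PRECONDITION & SPEC =====
def Spec_even_odd_sums (number_sequence : List Int) (out : List Int) : Prop := out = even_odd_sums_alt number_sequence
instance (number_sequence : List Int) (out : List Int) : Decidable (Spec_even_odd_sums number_sequence out) := by unfold Spec_even_odd_sums; infer_instance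

-- ===== CLAIM (what is proved, stated in full; the proofs are below) =====
def Claim_equal_even_odd_sums : Prop := ∀ (number_sequence : List Int), Dom_even_odd_sums number_sequence → Spec_even_odd_sums number_sequence (even_odd_sums number_sequence)

-- ===== LEMMAS AND PROOFS =====

-- B's paired fold splits into A's two filtered folds, for any accumulators.
theorem pair_foldl_split (g : Nat → Int) (l : List Nat) (e o : Int) :
    l.foldl (fun (r : Int × Int) i =>
        if i % 2 = 0 then (r.1 + g i, r.2) else (r.1, r.2 + g i)) (e, o)
    = (l.foldl (fun s i => if i % 2 = 0 then s + g i else s) e,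
       l.foldl (fun s i => if i % 2 = 1 then s + g i else s) o) := by
  induction l generalizing e o with
  | nil => rfl
  | cons i l ih =>
    simp only [List.foldl]
    by_cases h : i % 2 = 0
    · simp only [h, if_true]
      exact ih _ _
    · have h' : i % 2 = 1 := by omega
      simp only [h', if_true]
      exact ih _ _

-- ===== VERDICT (by name: the statement is the Claim_ definition above) =====
theorem even_odd_sums_spec : Claim_equal_even_odd_sums := by
  intro xs _
  unfold Spec_even_odd_sums even_odd_sums even_odd_sums_alt
  simp only [beq_iff_eq, bne_iff_ne, ne_eq, Nat.mod_two_ne_zero]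
  rw [pair_foldl_split]
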